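-- pv_equiv track=rewrite | github.com/voreshem/unpack_tuple | unpack_tuple.py | unpack_curly
-- ===== SOURCE A (Python) =====
-- def unpack_curly(ntup_list):
--     if len(ntup_list) <= 1:
--         ans = 'Expression undefined...'
--     elif len(ntup_list) == 2:
--         ans = '{' + '{' + str(ntup_list[0]) + '}' + ',' + '{' + str(ntup_list[0]) + ',' + str(ntup_list[1]) + '}' + '}'
--     else:
--         ans = '{' + str(unpack_curly(ntup_list[:len(ntup_list)-1])) + ',' + '{' + str(unpack_curly(ntup_list[:len(ntup_list)-1])) + ',' + str(ntup_list[len(ntup_list)-1:][0]) + '}' + '}'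
--     return ans
-- ===== SOURCE B (Python) =====
-- def unpack_curly(ntup_list):
--     # Iterative: build the nested expression bottom-up, computing each level once
--     # (A recomputes the same recursive sub-call twice per level: exponential time).
--     if len(ntup_list) <= 1:
--         return 'Expression undefined...'
--     s = '{{' + str(ntup_list[0]) + '},{' + str(ntup_list[0]) + ',' + str(ntup_list[1]) + '}}'
--     for x in ntup_list[2:]:
--         s = '{' + s + ',{' + s + ',' + str(x) + '}}'
--     return s
-- ===== Notes on version B (the rewrite author's own statement) =====
-- stated objective: faster
-- what changed: Replaced the double-recursive prefix recursion (which recomputes the same recursive sub-call twice per level, an exponential number of calls) with a single left-to-right loop that builds each nesting level once from the previous one; intended as faster, measured 11.85x at the largest size where both finish (n=16; the output string is itself exponential in n, so neither finishes at n=64).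
import Mathlib
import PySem

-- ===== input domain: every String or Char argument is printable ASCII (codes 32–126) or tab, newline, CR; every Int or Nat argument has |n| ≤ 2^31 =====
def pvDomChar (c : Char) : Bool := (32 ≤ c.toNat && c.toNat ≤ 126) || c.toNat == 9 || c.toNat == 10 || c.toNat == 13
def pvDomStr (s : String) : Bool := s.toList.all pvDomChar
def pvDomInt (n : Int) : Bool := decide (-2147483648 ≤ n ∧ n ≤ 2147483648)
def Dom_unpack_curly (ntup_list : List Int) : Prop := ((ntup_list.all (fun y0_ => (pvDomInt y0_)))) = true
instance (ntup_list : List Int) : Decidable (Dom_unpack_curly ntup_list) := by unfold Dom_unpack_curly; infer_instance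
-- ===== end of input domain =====

-- B replaces A's double recursion on the prefix (exponential number of calls) with one
-- left-to-right pass that builds each nesting level once; intended as faster, measured 11.85x at n=16,
-- the largest size where both finish (the output string is itself exponential in n).

-- ===== PORT A =====
-- literal transliteration of A: recursion on ntup_list[:len-1], the sub-call written twice
def unpack_curly (ntup_list : List Int) : String :=
  if ntup_list.length ≤ 1 then
    "Expression undefined..."
  else if ntup_list.length = 2 then
    "{" ++ "{" ++ PySem.Int.toStr (PySem.List.pyGetD ntup_list 0 0) ++ "}" ++ "," ++ "{"
      ++ PySem.Int.toStr (PySem.List.pyGetD ntup_list 0 0) ++ ","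
      ++ PySem.Int.toStr (PySem.List.pyGetD ntup_list 1 0) ++ "}" ++ "}"
  else
    "{" ++ unpack_curly (PySem.List.slice ntup_list none (some ((ntup_list.length : Int) - 1)))
      ++ "," ++ "{"
      ++ unpack_curly (PySem.List.slice ntup_list none (some ((ntup_list.length : Int) - 1)))
      ++ ","
      ++ PySem.Int.toStr (PySem.List.pyGetD (PySem.List.slice ntup_list (some ((ntup_list.length : Int) - 1)) none) 0 0)
      ++ "}" ++ "}"
termination_by ntup_list.length
decreasing_by
  all_goals
    rw [PySem.List.slice_to _ (by omega)]
    simp only [List.length_take]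
    omega

-- ===== PORT B =====
-- one level built from the previous one (the loop body of Source B)
def pvStep (s : String) (x : Int) : String :=
  "{" ++ s ++ ",{" ++ s ++ "," ++ PySem.Int.toStr x ++ "}}"

def unpack_curly_alt (ntup_list : List Int) : String :=
  match ntup_list with
  | a :: b :: rest =>
      rest.foldl pvStep
        ("{{" ++ PySem.Int.toStr a ++ "},{" ++ PySem.Int.toStr a ++ ","
          ++ PySem.Int.toStr b ++ "}}")
  | _ => "Expression undefined..."

-- ===== PRECONDITION & SPEC =====
def Spec_unpack_curly (ntup_list : List Int) (out : String) : Prop := out = unpack_curly_alt ntup_list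
instance (ntup_list : List Int) (out : String) : Decidable (Spec_unpack_curly ntup_list out) := by unfold Spec_unpack_curly; infer_instance

-- ===== CLAIM (what is proved, stated in full; the proofs are below) =====
def Claim_equal_unpack_curly : Prop := ∀ (ntup_list : List Int), Dom_unpack_curly ntup_list → Spec_unpack_curly ntup_list (unpack_curly ntup_list)

-- ===== LEMMAS AND PROOFS =====

-- A on a list of length ≥ 2 computes exactly B's fold (right-to-left peeling matches A's prefix recursion)
lemma unpack_curly_eq_foldl (a b : Int) (rest : List Int) :
    unpack_curly (a :: b :: rest) =
      rest.foldl pvStep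
        ("{{" ++ PySem.Int.toStr a ++ "},{" ++ PySem.Int.toStr a ++ ","
          ++ PySem.Int.toStr b ++ "}}") := by
  induction rest using List.reverseRecOn with
  | nil =>
      rw [unpack_curly]
      simp only [List.length_cons, List.length_nil, List.foldl_nil]
      norm_num
      simp only [show ((1 : Int) = ((1 : Nat) : Int)) by norm_num,
        PySem.List.pyGetD_natCast]
      apply String.ext
      simp [List.getD]
  | append_singleton rs x ih =>
      rw [unpack_curly]
      have hlen : (a :: b :: (rs ++ [x])).length = rs.length + 3 := by simp
      rw [if_neg (by omega), if_neg (by omega)]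
      have hcast : ((((a :: b :: (rs ++ [x])).length : Int)) - 1) = (((rs.length + 2 : Nat) : Int)) := by
        rw [hlen]; push_cast; ring
      have htake : PySem.List.slice (a :: b :: (rs ++ [x])) none (some (((a :: b :: (rs ++ [x])).length : Int) - 1)) = a :: b :: rs := by
        rw [hcast, PySem.List.slice_to_natCast]
        simp
      have hdrop : PySem.List.slice (a :: b :: (rs ++ [x])) (some (((a :: b :: (rs ++ [x])).length : Int) - 1)) none = [x] := by
        rw [hcast, PySem.List.slice_from_natCast]
        simp
      rw [htake, hdrop, ih, List.foldl_append]
      simp only [List.foldl_cons, List.foldl_nil, PySem.List.pyGetD_zero_cons, pvStep]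
      apply String.ext
      simp

-- ===== VERDICT (by name: the statement is the Claim_ definition above) =====
theorem unpack_curly_spec : Claim_equal_unpack_curly := by
  intro ntup_list _
  unfold Spec_unpack_curly
  match ntup_list with
  | [] => rw [unpack_curly]; rfl
  | [a] => rw [unpack_curly]; rfl
  | a :: b :: rest => exact unpack_curly_eq_foldl a b rest
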